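-- pv_equiv track=rewrite | github.com/ebamberger1/BiasInData | onehotencode.py | convertcatcolnames
-- ===== SOURCE A (Python) =====
-- def convertcatcolnames(cat_cols, coded_cols):
--     fd = []
--     prefixcode = coded_cols[0].partition('_')[0]
--     catprefix = cat_cols[0]
--     i = 0
--     for j in range(len(coded_cols)):
--         nextprefixcode = coded_cols[j].partition('_')[0]
--         suffix = coded_cols[j].partition('_')[2]
--         if (nextprefixcode != prefixcode):
--             prefixcode = nextprefixcode
--             i+=1
--             catprefix = cat_cols[i]
--         fd.append(catprefix + '_' + suffix)
--
--     return list(fd)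
-- ===== SOURCE B (Python) =====
-- def convertcatcolnames(cat_cols, coded_cols):
--     # Group coded_cols into consecutive runs sharing the same '_'-prefix code,
--     # emitting one cat_cols entry per run (run-splitting instead of a per-element
--     # state machine).
--     out = []
--     i = 0
--     cols = list(coded_cols)
--     while cols:
--         p = cols[0].partition('_')[0]
--         k = 1
--         while k < len(cols) and cols[k].partition('_')[0] == p:
--             k += 1
--         catprefix = cat_cols[i]
--         out += [catprefix + '_' + c.partition('_')[2] for c in cols[:k]]
--         cols = cols[k:]
--         i += 1
--     return out
-- ===== Notes on version B (the rewrite author's own statement) =====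
-- stated objective: alternative
-- what changed: B splits coded_cols into consecutive runs of equal '_'-prefix and emits each run with its cat_cols entry, replacing A's per-element state machine carrying prefixcode/catprefix/i.
import Mathlib
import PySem

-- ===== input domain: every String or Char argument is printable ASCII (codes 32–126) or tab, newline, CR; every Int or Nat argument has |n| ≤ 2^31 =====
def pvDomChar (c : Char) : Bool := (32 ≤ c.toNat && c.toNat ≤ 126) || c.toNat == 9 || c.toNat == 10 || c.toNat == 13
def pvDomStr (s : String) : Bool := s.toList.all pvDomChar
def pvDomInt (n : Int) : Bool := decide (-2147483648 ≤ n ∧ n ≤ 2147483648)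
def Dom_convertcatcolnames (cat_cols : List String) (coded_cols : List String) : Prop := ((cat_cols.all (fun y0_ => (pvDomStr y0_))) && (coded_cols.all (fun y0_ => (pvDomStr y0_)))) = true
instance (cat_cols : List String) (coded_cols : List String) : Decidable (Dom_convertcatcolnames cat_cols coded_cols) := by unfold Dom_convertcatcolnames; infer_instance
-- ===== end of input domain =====

-- B groups coded_cols into consecutive runs with the same '_'-prefix (one cat_cols entry per run)
-- instead of A's per-element state machine; objective: alternative decomposition, not speed.

-- s.partition('_')[0]: the part before the first '_' (whole string if none); exact for a one-char separator
def prefOf (s : String) : String := String.ofList (s.toList.takeWhile (fun c => c ≠ '_'))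
-- s.partition('_')[2]: the part after the first '_' ('' if none); exact for a one-char separator
def sufOf (s : String) : String :=
  match s.toList.dropWhile (fun c => c ≠ '_') with
  | [] => ""
  | _ :: t => String.ofList t

-- ===== PORT A =====
-- A's for-loop over range(len(coded_cols)) with coded_cols[j], as structural recursion over
-- coded_cols with the same state (fd, prefixcode, catprefix, i); out-of-range cat_cols[i] /
-- coded_cols[0] (Python IndexError) is excluded by Pre_ (getD "" is never reached inside Pre_).
def loopA (cat_cols : List String) : List String → List String → String → String → Nat → List String
  | fd, [], _, _, _ => fd
  | fd, c :: rest, prefixcode, catprefix, i =>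
      let nextprefixcode := prefOf c
      let suffix := sufOf c
      if nextprefixcode ≠ prefixcode then
        let i' := i + 1
        let catprefix' := cat_cols.getD i' ""
        loopA cat_cols (fd ++ [catprefix' ++ "_" ++ suffix]) rest nextprefixcode catprefix' i'
      else
        loopA cat_cols (fd ++ [catprefix ++ "_" ++ suffix]) rest prefixcode catprefix i

def convertcatcolnames (cat_cols : List String) (coded_cols : List String) : List String :=
  let prefixcode := prefOf (coded_cols.getD 0 "")
  let catprefix := cat_cols.getD 0 ""
  loopA cat_cols [] coded_cols prefixcode catprefix 0

-- ===== PORT B =====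
-- Source B's outer while over the remaining cols: take the leading run (inner while starting at k = 1),
-- emit it with cat_cols[i], continue on cols[k:].
def goB (cat_cols : List String) : Nat → List String → List String
  | _, [] => []
  | i, c :: rest =>
      let p := prefOf c
      let run := c :: rest.takeWhile (fun x => prefOf x == p)
      let rest' := rest.dropWhile (fun x => prefOf x == p)
      run.map (fun x => cat_cols.getD i "" ++ "_" ++ sufOf x) ++ goB cat_cols (i + 1) rest'
  termination_by _ cols => cols.length
  decreasing_by
    simp only [List.length_cons]
    exact Nat.lt_succ_of_le (List.length_dropWhile_le _ _)

def convertcatcolnames_alt (cat_cols : List String) (coded_cols : List String) : List String :=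
  goB cat_cols 0 coded_cols

-- ===== PRECONDITION & SPEC =====
-- number of consecutive runs of equal '_'-prefix in the list
def runCount : List String → Nat
  | [] => 0
  | [_] => 1
  | a :: b :: t => (if prefOf a = prefOf b then 0 else 1) + runCount (b :: t)

-- Pre_ excludes exactly the inputs on which Python A raises IndexError: empty coded_cols
-- (coded_cols[0]) and more prefix runs than cat_cols entries (cat_cols[i]).
def Pre_convertcatcolnames (cat_cols : List String) (coded_cols : List String) : Prop :=
  coded_cols ≠ [] ∧ runCount coded_cols ≤ cat_cols.length
instance (cat_cols : List String) (coded_cols : List String) : Decidable (Pre_convertcatcolnames cat_cols coded_cols) := by unfold Pre_convertcatcolnames; infer_instance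

def pvWitness_convertcatcolnames : List String × List String :=
  (["color", "size"], ["c_red", "c_blue", "s_small"])

def Spec_convertcatcolnames (cat_cols : List String) (coded_cols : List String) (out : List String) : Prop := out = convertcatcolnames_alt cat_cols coded_cols
instance (cat_cols : List String) (coded_cols : List String) (out : List String) : Decidable (Spec_convertcatcolnames cat_cols coded_cols out) := by unfold Spec_convertcatcolnames; infer_instance

-- ===== CLAIM (what is proved, stated in full; the proofs are below) =====
def Claim_equal_convertcatcolnames : Prop := ∀ (cat_cols : List String) (coded_cols : List String), Dom_convertcatcolnames cat_cols coded_cols → Pre_convertcatcolnames cat_cols coded_cols → Spec_convertcatcolnames cat_cols coded_cols (convertcatcolnames cat_cols coded_cols)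

-- ===== LEMMAS AND PROOFS =====

-- A's loop, run from any state whose catprefix is cat_cols[i] and whose prefixcode is p, first
-- finishes the current run of prefix p and then behaves like B's grouping loop at index i+1.
theorem loopA_eq (cat_cols : List String) (cols : List String) :
    ∀ (fd : List String) (p : String) (i : Nat),
      loopA cat_cols fd cols p (cat_cols.getD i "") i
        = fd ++ (cols.takeWhile (fun x => prefOf x == p)).map
              (fun x => cat_cols.getD i "" ++ "_" ++ sufOf x)
            ++ goB cat_cols (i + 1) (cols.dropWhile (fun x => prefOf x == p)) := by
  induction cols with
  | nil => intro fd p i; simp [loopA, goB]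
  | cons c t ih =>
      intro fd p i
      simp only [List.getD_eq_getElem?_getD] at ih
      by_cases h : prefOf c = p
      · have hb : (prefOf c == p) = true := by simp [h]
        simp [loopA, h, ih]
      · have hb : (prefOf c == p) = false := by simp [h]
        simp [loopA, h, hb, ih, goB]

theorem convertcatcolnames_eq_alt (cat_cols : List String) (coded_cols : List String) :
    convertcatcolnames cat_cols coded_cols = convertcatcolnames_alt cat_cols coded_cols := by
  cases coded_cols with
  | nil => simp [convertcatcolnames, convertcatcolnames_alt, loopA, goB]
  | cons c t =>
      show loopA cat_cols [] (c :: t) (prefOf c) (cat_cols.getD 0 "") 0 = _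
      rw [loopA_eq]
      simp [convertcatcolnames_alt, goB]

-- ===== VERDICT (by name: the statement is the Claim_ definition above) =====
theorem convertcatcolnames_spec : Claim_equal_convertcatcolnames := by
  intro cat_cols coded_cols _ _
  exact convertcatcolnames_eq_alt cat_cols coded_cols
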